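-- pv_equiv track=rewrite | github.com/Ka2507/hackutd2025 | backend/orchestrator/cost_aware_orchestrator.py | _group_similar_tasks
-- ===== SOURCE A (Python) =====
-- from typing import Dict, Any, List, Optional, Tuple
--
-- def _group_similar_tasks(tasks: List[Dict[str, Any]]) -> List[List[Dict[str, Any]]]:
--     """Group tasks by similarity for batching"""
--     groups = []
--
--     # Simple grouping by task type
--     type_groups = {}
--     for task in tasks:
--         task_type = task.get("task_type", "general")
--         if task_type not in type_groups:
--             type_groups[task_type] = []
--         type_groups[task_type].append(task)
--
--     # Create groups (max 3 tasks per batch to maintain quality)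
--     for task_type, type_tasks in type_groups.items():
--         for i in range(0, len(type_tasks), 3):
--             groups.append(type_tasks[i:i+3])
--
--     return groups
-- ===== SOURCE B (Python) =====
-- from typing import Dict, Any, List
--
-- def _group_similar_tasks(tasks: List[Dict[str, Any]]) -> List[List[Dict[str, Any]]]:
--     """Group tasks by type into batches of at most 3, in one pass:
--     grow the last batch of the task's type, or start a new batch when it is full."""
--     batches_by_type = {}
--     for task in tasks:
--         t = task.get("task_type", "general")
--         bs = batches_by_type.get(t, [])
--         if bs and len(bs[-1]) < 3:
--             batches_by_type[t] = bs[:-1] + [bs[-1] + [task]]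
--         else:
--             batches_by_type[t] = bs + [[task]]
--     out = []
--     for bs in batches_by_type.values():
--         out += bs
--     return out
-- ===== Notes on version B (the rewrite author's own statement) =====
-- stated objective: alternative
-- what changed: A groups all tasks by type into full per-type lists and then chunks each list into 3s with a second index loop over range(0,len,3) and slicing; B never builds the per-type lists: in a single pass it maintains for each type its list of batches, extending the last batch or opening a new one, and finally concatenates the batches across types.
import Mathlib
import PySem

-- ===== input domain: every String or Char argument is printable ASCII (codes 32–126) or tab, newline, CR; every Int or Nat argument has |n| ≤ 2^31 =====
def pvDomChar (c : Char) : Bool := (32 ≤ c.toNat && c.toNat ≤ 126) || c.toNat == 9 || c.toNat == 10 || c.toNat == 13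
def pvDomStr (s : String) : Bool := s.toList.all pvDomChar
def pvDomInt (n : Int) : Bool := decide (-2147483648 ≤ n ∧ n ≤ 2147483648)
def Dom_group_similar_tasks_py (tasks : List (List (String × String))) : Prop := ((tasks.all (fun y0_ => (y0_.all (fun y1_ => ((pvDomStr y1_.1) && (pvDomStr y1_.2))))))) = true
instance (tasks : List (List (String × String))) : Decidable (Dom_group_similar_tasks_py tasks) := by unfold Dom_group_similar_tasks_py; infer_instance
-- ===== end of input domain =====

-- B batches each type as it goes in one pass (extend the type's last batch or open a new one), instead of A's two passes: group-by-type then chunk each group by range/slicing; same O(n) cost, different decomposition.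


-- ===== PORT A =====
-- task.get("task_type", "general") on a task dict (used by both ports)
def pvTaskType (task : List (String × String)) : String :=
  PySem.Dict.getD (PySem.Dict.mk task) "task_type" "general"

def group_similar_tasks_py (tasks : List (List (String × String))) : List (List (List (String × String))) :=
  let type_groups : PySem.Dict String (List (List (String × String))) :=
    tasks.foldl (fun tg task =>
      let task_type := pvTaskType task
      let tg := if tg.contains task_type then tg else tg.insert task_type []
      tg.modify task_type [] (fun l => l ++ [task])) PySem.Dict.empty
  type_groups.items.foldl (fun groups p =>
    (PySem.List.pyRange 0 (p.2.length : Int) 3).foldl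
      (fun groups i => groups ++ [PySem.List.slice p.2 (some i) (some (i + 3))]) groups) []

-- ===== PORT B =====
def group_similar_tasks_py_alt (tasks : List (List (String × String))) : List (List (List (String × String))) :=
  let batches_by_type : PySem.Dict String (List (List (List (String × String)))) :=
    tasks.foldl (fun d task =>
      let t := pvTaskType task
      let bs := d.getD t []
      match bs.getLast? with
      | some last =>
        if last.length < 3 then d.insert t (bs.dropLast ++ [last ++ [task]])
        else d.insert t (bs ++ [[task]])
      | none => d.insert t (bs ++ [[task]])) PySem.Dict.empty
  batches_by_type.values.foldl (fun out bs => out ++ bs) []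

-- ===== PRECONDITION & SPEC =====
def Spec_group_similar_tasks_py (tasks : List (List (String × String))) (out : List (List (List (String × String)))) : Prop := out = group_similar_tasks_py_alt tasks
instance (tasks : List (List (String × String))) (out : List (List (List (String × String)))) : Decidable (Spec_group_similar_tasks_py tasks out) := by unfold Spec_group_similar_tasks_py; infer_instance

-- ===== CLAIM (what is proved, stated in full; the proofs are below) =====
def Claim_equal_group_similar_tasks_py : Prop := ∀ (tasks : List (List (String × String))), Dom_group_similar_tasks_py tasks → Spec_group_similar_tasks_py tasks (group_similar_tasks_py tasks)

-- ===== LEMMAS AND PROOFS =====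

def chunks3 {α : Type} : List α → List (List α)
  | [] => []
  | x :: xs => (x :: xs.take 2) :: chunks3 (xs.drop 2)
termination_by xs => xs.length
decreasing_by simp

lemma chunks3_eq_nil {α : Type} (xs : List α) : chunks3 xs = [] ↔ xs = [] := by
  cases xs <;> simp [chunks3]

lemma chunks3_snoc {α : Type} (xs : List α) (y : α) :
    chunks3 (xs ++ [y]) =
      (match (chunks3 xs).getLast? with
       | some last =>
         if last.length < 3 then (chunks3 xs).dropLast ++ [last ++ [y]]
         else chunks3 xs ++ [[y]]
       | none => chunks3 xs ++ [[y]]) := by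
  induction xs using chunks3.induct with
  | case1 => simp [chunks3]
  | case2 x xs ih =>
    match xs with
    | [] => simp [chunks3]
    | [a] => simp [chunks3]
    | a :: b :: t =>
      simp only [List.drop_succ_cons, List.drop_zero] at ih
      rcases h : chunks3 t with _ | ⟨c, l⟩
      · have ht : t = [] := (chunks3_eq_nil t).mp h
        subst ht
        simp [chunks3]
      · simp only [List.cons_append, chunks3, List.take_succ_cons, List.take_zero,
          List.drop_succ_cons, List.drop_zero, ih, h]
        rcases hl : (c :: l).getLast? with _ | z
        · simp at hl
        · simp only [List.getLast?_cons, hl]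
          simp only [Option.getD_some]
          split_ifs with hz
          · simp [List.dropLast_cons_of_ne_nil]
          · rfl

lemma range_chunks {α : Type} (ts : List α) :
    (List.range ((ts.length + 2)/3)).map (fun k => ((ts.drop (3*k)).take 3)) = chunks3 ts := by
  induction ts using chunks3.induct with
  | case1 => simp [chunks3]
  | case2 x xs ih =>
    simp only [List.length_drop] at ih
    have hc : ((x :: xs).length + 2)/3 = ((xs.length - 2) + 2)/3 + 1 := by
      simp; omega
    rw [hc, List.range_succ_eq_map, chunks3]
    simp only [List.map_cons, List.map_map]
    refine List.cons_eq_cons.mpr ⟨by simp, ?_⟩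
    rw [← ih]
    apply List.map_congr_left
    intro k _
    simp only [Function.comp_apply]
    rw [List.drop_drop, show 3 * Nat.succ k = (3*k + 2) + 1 from by omega, List.drop_succ_cons]
    congr 2
    omega

lemma inner_eq {α : Type} (ts : List α) (g0 : List (List α)) :
    (PySem.List.pyRange 0 (ts.length : Int) 3).foldl
      (fun g i => g ++ [PySem.List.slice ts (some i) (some (i + 3))]) g0 = g0 ++ chunks3 ts := by
  rw [PySem.List.pyRange_of_pos 0 (ts.length : Int) (by norm_num)]
  have hc : (if (0:Int) < (ts.length : Int) then (((ts.length : Int) - 0 + 3 - 1)/3).toNat else 0)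
      = (ts.length + 2)/3 := by
    split_ifs with h <;> omega
  rw [hc, List.foldl_map]
  have hstep : ∀ (g : List (List α)) (k : Nat), k ∈ List.range ((ts.length + 2)/3) →
      g ++ [PySem.List.slice ts (some (0 + 3*(k:Int))) (some (0 + 3*(k:Int) + 3))]
        = g ++ [(ts.drop (3*k)).take 3] := by
    intro g k _
    have h1 : (0 + 3*(k:Int)) = ((3*k : Nat) : Int) := by push_cast; ring
    have h2 : (0 + 3*(k:Int) + 3) = ((3*k + 3 : Nat) : Int) := by push_cast; ring
    rw [h2, h1, PySem.List.slice_natCast]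
    have h3 : 3*k + 3 - 3*k = 3 := by omega
    rw [h3]
  refine Eq.trans (PySem.List.foldl_congr_mem _ _ _ _ hstep) ?_
  rw [PySem.List.foldl_append_singleton_eq_map, range_chunks]

def pvG (p : String × List (List (String × String))) :
    String × List (List (List (String × String))) := (p.1, chunks3 p.2)

lemma getD_rel (dA : PySem.Dict String (List (List (String × String))))
    (dB : PySem.Dict String (List (List (List (String × String)))))
    (h : dB.items = dA.items.map pvG) (t : String) :
    dB.getD t [] = chunks3 (dA.getD t []) := by
  simp only [PySem.Dict.getD, PySem.Dict.get?, h, List.find?_map]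
  rw [show ((fun (p : String × List (List (List (String × String)))) => p.1 == t) ∘ pvG)
      = (fun (p : String × List (List (String × String))) => p.1 == t) from rfl]
  cases dA.items.find? (fun p => p.1 == t) with
  | none => simp [chunks3]
  | some p => simp [pvG]

lemma cont_rel (dA : PySem.Dict String (List (List (String × String))))
    (dB : PySem.Dict String (List (List (List (String × String)))))
    (h : dB.items = dA.items.map pvG) (t : String) :
    dB.contains t = dA.contains t := by
  simp only [PySem.Dict.contains, h, List.any_map]
  rfl

lemma insert_rel (dA : PySem.Dict String (List (List (String × String))))
    (dB : PySem.Dict String (List (List (List (String × String)))))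
    (h : dB.items = dA.items.map pvG) (t : String)
    (v : List (List (String × String))) :
    (dB.insert t (chunks3 v)).items = ((dA.insert t v).items).map pvG := by
  rw [PySem.Dict.items_insert, PySem.Dict.items_insert, cont_rel dA dB h t]
  by_cases c : dA.contains t
  · simp only [c, if_true, h, List.map_map]
    apply List.map_congr_left
    intro p _
    by_cases hp : p.1 = t <;> simp [hp, pvG]
  · simp [c, h, pvG]

lemma key_false {ν : Type} (d : PySem.Dict String ν) (t : String)
    (c : d.contains t = false) : ∀ p ∈ d.items, (p.1 == t) = false := by
  intro p hp
  simp only [PySem.Dict.contains, List.any_eq_false] at c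
  simpa using c p hp

lemma insert_insert_items {ν : Type} (d : PySem.Dict String ν) (t : String) (v w : ν) :
    ((d.insert t v).insert t w).items = (d.insert t w).items := by
  rw [PySem.Dict.items_insert, PySem.Dict.items_insert, PySem.Dict.items_insert,
    PySem.Dict.contains_insert_self]
  by_cases c : d.contains t
  · simp only [c, if_true, List.map_map]
    apply List.map_congr_left
    intro p _
    by_cases hp : p.1 = t <;> simp [hp]
  · have hc : d.contains t = false := by simpa using c
    have hk := key_false d t hc
    simp only [hc, Bool.false_eq_true, if_false, if_true, List.map_append]
    congr 1
    · rw [show List.map (fun p => if (p.1 == t) = true then (t, w) else p) d.items = d.items from by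
        conv_rhs => rw [← List.map_id d.items]
        apply List.map_congr_left
        intro p hp
        simp [hk p hp]]
    · simp

lemma step_rel (dA : PySem.Dict String (List (List (String × String))))
    (dB : PySem.Dict String (List (List (List (String × String)))))
    (task : List (String × String)) (h : dB.items = dA.items.map pvG) :
    (let t := pvTaskType task
     let bs := dB.getD t []
     match bs.getLast? with
     | some last =>
       if last.length < 3 then dB.insert t (bs.dropLast ++ [last ++ [task]])
       else dB.insert t (bs ++ [[task]])
     | none => dB.insert t (bs ++ [[task]])).items =
    ((let task_type := pvTaskType task
      let tg := if dA.contains task_type then dA else dA.insert task_type []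
      tg.modify task_type [] (fun l => l ++ [task])).items).map pvG := by
  have hbs := getD_rel dA dB h (pvTaskType task)
  have hB : (let t := pvTaskType task
     let bs := dB.getD t []
     match bs.getLast? with
     | some last =>
       if last.length < 3 then dB.insert t (bs.dropLast ++ [last ++ [task]])
       else dB.insert t (bs ++ [[task]])
     | none => dB.insert t (bs ++ [[task]]))
      = dB.insert (pvTaskType task) (chunks3 (dA.getD (pvTaskType task) [] ++ [task])) := by
    show (match (dB.getD (pvTaskType task) []).getLast? with
     | some last =>
       if last.length < 3 then
         dB.insert (pvTaskType task) ((dB.getD (pvTaskType task) []).dropLast ++ [last ++ [task]])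
       else dB.insert (pvTaskType task) ((dB.getD (pvTaskType task) []) ++ [[task]])
     | none => dB.insert (pvTaskType task) ((dB.getD (pvTaskType task) []) ++ [[task]])) = _
    rw [hbs, chunks3_snoc]
    cases (chunks3 (dA.getD (pvTaskType task) [])).getLast? with
    | none => rfl
    | some last =>
        simp only []
        split_ifs <;> rfl
  rw [hB]
  by_cases c : dA.contains (pvTaskType task)
  · show _ = ((if dA.contains (pvTaskType task) then dA else dA.insert (pvTaskType task) []).modify
        (pvTaskType task) [] (fun l => l ++ [task])).items.map pvG
    rw [if_pos c]
    show _ = (dA.insert (pvTaskType task) (dA.getD (pvTaskType task) [] ++ [task])).items.map pvG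
    exact insert_rel dA dB h _ _
  · show _ = ((if dA.contains (pvTaskType task) then dA else dA.insert (pvTaskType task) []).modify
        (pvTaskType task) [] (fun l => l ++ [task])).items.map pvG
    rw [if_neg c]
    show _ = ((dA.insert (pvTaskType task) []).insert (pvTaskType task)
        ((dA.insert (pvTaskType task) []).getD (pvTaskType task) [] ++ [task])).items.map pvG
    have hc : dA.contains (pvTaskType task) = false := by simpa using c
    rw [PySem.Dict.getD_insert_self]
    have hold : dA.getD (pvTaskType task) [] = [] := PySem.Dict.getD_of_not_contains dA _ hc
    rw [hold]
    rw [show (([] : List (List (String × String))) ++ [task]) = [task] from rfl]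
    calc (dB.insert (pvTaskType task) (chunks3 [task])).items
        = (dA.insert (pvTaskType task) [task]).items.map pvG := insert_rel dA dB h _ _
      _ = ((dA.insert (pvTaskType task) []).insert (pvTaskType task) [task]).items.map pvG := by
          rw [insert_insert_items]


lemma fold_rel (tasks : List (List (String × String))) :
    ∀ (dA : PySem.Dict String (List (List (String × String))))
      (dB : PySem.Dict String (List (List (List (String × String))))),
      dB.items = dA.items.map pvG →
      (tasks.foldl (fun d task =>
        let t := pvTaskType task
        let bs := d.getD t []
        match bs.getLast? with
        | some last =>
          if last.length < 3 then d.insert t (bs.dropLast ++ [last ++ [task]])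
          else d.insert t (bs ++ [[task]])
        | none => d.insert t (bs ++ [[task]])) dB).items =
      ((tasks.foldl (fun tg task =>
        let task_type := pvTaskType task
        let tg := if tg.contains task_type then tg else tg.insert task_type []
        tg.modify task_type [] (fun l => l ++ [task])) dA).items).map pvG := by
  induction tasks with
  | nil => intro dA dB h; simpa using h
  | cons task rest ih =>
    intro dA dB h
    simp only [List.foldl_cons]
    exact ih _ _ (step_rel dA dB task h)

-- ===== VERDICT (by name: the statement is the Claim_ definition above) =====
theorem group_similar_tasks_py_spec : Claim_equal_group_similar_tasks_py := by
  intro tasks _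
  show group_similar_tasks_py tasks = group_similar_tasks_py_alt tasks
  unfold group_similar_tasks_py group_similar_tasks_py_alt
  have hrel := fold_rel tasks PySem.Dict.empty PySem.Dict.empty (by simp [PySem.Dict.empty])
  rw [PySem.List.foldl_congr_mem _ _
      (fun (groups : List (List (List (String × String))))
        (p : String × List (List (String × String))) => groups ++ chunks3 p.2) _
      (fun acc p _ => inner_eq p.2 acc)]
  rw [PySem.List.foldl_append_eq_flatMap, PySem.List.foldl_append_eq_flatten]
  simp only [PySem.Dict.values, hrel, List.nil_append, List.map_map]
  rw [show ((fun (x : String × List (List (List (String × String)))) => x.2) ∘ pvG)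
    = fun (p : String × List (List (String × String))) => chunks3 p.2 from rfl]
  rw [List.flatMap_def]
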